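-- pv_equiv track=rewrite | github.com/hehank376/rag-knowledge-qa-system | rag_system/database/adapters/postgresql_adapter.py | _convert_placeholders
-- ===== SOURCE A (Python) =====
-- def _convert_placeholders(query: str) -> str:
--     """将?占位符转换为PostgreSQL的$1, $2, ...格式"""
--     parts = query.split('?')
--     if len(parts) == 1:
--         return query
--
--     result = parts[0]
--     for i, part in enumerate(parts[1:], 1):
--         result += f"${i}" + part
--
--     return result
-- ===== SOURCE B (Python) =====
-- def _convert_placeholders(query: str) -> str:
--     """将?占位符转换为PostgreSQL的$1, $2, ...格式"""
--     out = []
--     n = 0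
--     for ch in query:
--         if ch == '?':
--             n += 1
--             out.append(f"${n}")
--         else:
--             out.append(ch)
--     return ''.join(out)
-- ===== Notes on version B (the rewrite author's own statement) =====
-- stated objective: idiomatic
-- what changed: Replaces splitting the query into parts and rebuilding with enumerate-and-concatenate by a single character scan that maintains a counter and emits the numbered placeholder in place of each question mark.
import Mathlib
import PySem

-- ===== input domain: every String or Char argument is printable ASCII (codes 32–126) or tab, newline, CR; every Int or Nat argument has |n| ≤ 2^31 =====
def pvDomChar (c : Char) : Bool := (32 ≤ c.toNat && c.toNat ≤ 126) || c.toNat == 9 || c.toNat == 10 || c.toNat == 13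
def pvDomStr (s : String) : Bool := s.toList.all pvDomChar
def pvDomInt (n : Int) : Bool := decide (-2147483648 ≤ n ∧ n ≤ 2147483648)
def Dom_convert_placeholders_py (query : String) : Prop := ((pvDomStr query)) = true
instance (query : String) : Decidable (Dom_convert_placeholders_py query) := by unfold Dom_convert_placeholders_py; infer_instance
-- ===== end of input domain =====

-- B replaces A's split-and-rebuild with a single counter-carrying scan over the characters (idiomatic; same cost).

-- ===== PORT A =====
-- parts = query.split('?'); if len(parts)==1 return query; result = parts[0];
-- for i, part in enumerate(parts[1:], 1): result += f"${i}" + part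
def convert_placeholders_py (query : String) : String :=
  let parts : List String := (PySem.Chars.splitOn query.toList ['?']).map String.ofList
  if parts.length = 1 then query
  else
    ((parts.drop 1).foldl
      (fun (st : Nat × String) part =>
        (st.1 + 1, st.2 ++ ("$" ++ PySem.Int.toStr (st.1 : Int)) ++ part))
      (1, parts.headD "")).2

-- ===== PORT B =====
-- out = []; n = 0; for ch in query: if ch=='?': n+=1; out.append(f"${n}") else out.append(ch); return ''.join(out)
def convert_placeholders_py_alt (query : String) : String :=
  let st := query.toList.foldl
    (fun (st : Nat × List String) ch =>
      if ch = '?' then (st.1 + 1, st.2 ++ ["$" ++ PySem.Int.toStr ((st.1 + 1 : Nat) : Int)])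
      else (st.1, st.2 ++ [String.ofList [ch]]))
    (0, ([] : List String))
  PySem.Str.join "" st.2

-- ===== PRECONDITION & SPEC =====
def Spec_convert_placeholders_py (query : String) (out : String) : Prop := out = convert_placeholders_py_alt query
instance (query : String) (out : String) : Decidable (Spec_convert_placeholders_py query out) := by unfold Spec_convert_placeholders_py; infer_instance

-- ===== CLAIM (what is proved, stated in full; the proofs are below) =====
def Claim_equal_convert_placeholders_py : Prop := ∀ (query : String), Dom_convert_placeholders_py query → Spec_convert_placeholders_py query (convert_placeholders_py query)

-- ===== LEMMAS AND PROOFS =====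

-- simple recursive characterisation of splitting on '?'
def mySplit : List Char → List (List Char)
  | [] => [[]]
  | c :: rest =>
    match mySplit rest with
    | p :: ps => if c = '?' then [] :: p :: ps else (c :: p) :: ps
    | [] => [[]]

def dollar (n : Nat) : List Char := '$' :: (PySem.Int.toStr (n : Int)).toList

-- rebuild of the tail parts with increasing counter (A's loop, char level)
def rebuildTail : List (List Char) → Nat → List Char
  | [], _ => []
  | p :: ps, n => dollar n ++ p ++ rebuildTail ps (n + 1)

-- B's scan, char level
def scanC : List Char → Nat → List Char
  | [], _ => []
  | c :: rest, n => if c = '?' then dollar (n + 1) ++ scanC rest (n + 1) else c :: scanC rest n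

theorem mySplit_ne_nil (cs : List Char) : mySplit cs ≠ [] := by
  cases cs with
  | nil => simp [mySplit]
  | cons c rest =>
    simp only [mySplit]
    rcases h : mySplit rest with _ | ⟨p, ps⟩ <;> simp <;> split <;> simp

def consHead (x : List Char) : List (List Char) → List (List Char)
  | [] => [x]
  | p :: ps => (x ++ p) :: ps

theorem go_zero (cur : List Char) (acc : List (List Char)) :
    PySem.Chars.splitOn.go ['?'] 0 [] cur acc = ((cur.reverse ++ []) :: acc).reverse := by
  rw [PySem.Chars.splitOn.go]

theorem go_nil (fuel : Nat) (cur : List Char) (acc : List (List Char)) :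
    PySem.Chars.splitOn.go ['?'] (fuel + 1) [] cur acc = (cur.reverse :: acc).reverse := by
  rw [PySem.Chars.splitOn.go]
  simp

theorem go_cons (fuel : Nat) (c : Char) (rest cur : List Char) (acc : List (List Char)) :
    PySem.Chars.splitOn.go ['?'] (fuel + 1) (c :: rest) cur acc =
      if List.isPrefixOf ['?'] (c :: rest)
      then PySem.Chars.splitOn.go ['?'] fuel rest [] (cur.reverse :: acc)
      else PySem.Chars.splitOn.go ['?'] fuel rest (c :: cur) acc := by
  rw [PySem.Chars.splitOn.go]
  simp

theorem go_spec (fuel : Nat) (l cur : List Char) (acc : List (List Char))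
    (h : l.length ≤ fuel) :
    PySem.Chars.splitOn.go ['?'] fuel l cur acc =
      acc.reverse ++ consHead cur.reverse (mySplit l) := by
  induction fuel generalizing l cur acc with
  | zero =>
    have hl : l = [] := List.length_eq_zero_iff.mp (Nat.le_zero.mp h)
    subst hl
    rw [go_zero]
    simp [mySplit, consHead]
  | succ fuel ih =>
    cases l with
    | nil =>
      rw [go_nil]
      simp [mySplit, consHead]
    | cons c rest =>
      have hr : rest.length ≤ fuel := by simpa using h
      rw [go_cons]
      by_cases hc : c = '?'
      · have hp : List.isPrefixOf ['?'] (c :: rest) = true := by simp [List.isPrefixOf, hc]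
        rw [if_pos hp]
        rw [ih rest [] (cur.reverse :: acc) hr]
        rcases hm : mySplit rest with _ | ⟨p, ps⟩
        · exact absurd hm (mySplit_ne_nil rest)
        · simp [mySplit, hm, hc, consHead]
      · have hp : List.isPrefixOf ['?'] (c :: rest) = false := by
          simp [List.isPrefixOf]; exact fun hkkk => absurd hkkk.symm hc
        rw [if_neg (by simp [hp])]
        rw [ih rest (c :: cur) acc hr]
        rcases hm : mySplit rest with _ | ⟨p, ps⟩
        · exact absurd hm (mySplit_ne_nil rest)
        · simp [mySplit, hm, hc, consHead]

theorem splitOn_eq_mySplit (cs : List Char) :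
    PySem.Chars.splitOn cs ['?'] = mySplit cs := by
  have := go_spec (cs.length + 1) cs [] [] (by omega)
  rw [PySem.Chars.splitOn, this]
  rcases h : mySplit cs with _ | ⟨p, ps⟩
  · exact absurd h (mySplit_ne_nil cs)
  · simp [consHead]

theorem scanC_eq (cs : List Char) (n : Nat) :
    scanC cs n = (mySplit cs).headD [] ++ rebuildTail ((mySplit cs).drop 1) (n + 1) := by
  induction cs generalizing n with
  | nil => simp [scanC, mySplit, rebuildTail]
  | cons c rest ih =>
    rcases h : mySplit rest with _ | ⟨p, ps⟩
    · exact absurd h (mySplit_ne_nil rest)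
    · by_cases hc : c = '?'
      · simp [scanC, mySplit, h, hc, ih, rebuildTail]
      · simp [scanC, mySplit, h, hc, ih]

theorem mySplit_singleton (cs p : List Char) (h : mySplit cs = [p]) : cs = p := by
  induction cs generalizing p with
  | nil => simp [mySplit] at h; exact h.symm
  | cons c rest ih =>
    rcases h' : mySplit rest with _ | ⟨q, qs⟩
    · exact absurd h' (mySplit_ne_nil rest)
    · by_cases hc : c = '?'
      · simp [mySplit, h', hc] at h
      · simp [mySplit, h', hc] at h
        obtain ⟨h1, h2⟩ := h
        subst h2
        simp_all

-- A's foldl ↔ rebuildTail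
theorem foldA (ps : List String) (i : Nat) (res : String) :
    ((ps.foldl
      (fun (st : Nat × String) part =>
        (st.1 + 1, st.2 ++ ("$" ++ PySem.Int.toStr (st.1 : Int)) ++ part))
      (i, res)).2).toList = res.toList ++ rebuildTail (ps.map String.toList) i := by
  induction ps generalizing i res with
  | nil => simp [rebuildTail]
  | cons p ps ih => simp [List.foldl, ih, rebuildTail, dollar]

theorem join_empty_flatten (ps : List (List Char)) :
    PySem.Chars.join [] ps = ps.flatten := by
  induction ps with
  | nil => simp [PySem.Chars.join_nil]
  | cons p rest ih =>
    cases rest with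
    | nil => simp [PySem.Chars.join_singleton]
    | cons q rest' => simp [PySem.Chars.join_cons_cons]; simpa using ih

-- B's foldl ↔ scanC
theorem foldB (cs : List Char) (n : Nat) (out : List String) :
    (PySem.Str.join "" ((cs.foldl
      (fun (st : Nat × List String) ch =>
        if ch = '?' then (st.1 + 1, st.2 ++ ["$" ++ PySem.Int.toStr ((st.1 + 1 : Nat) : Int)])
        else (st.1, st.2 ++ [String.ofList [ch]]))
      (n, out)).2)).toList =
      (PySem.Str.join "" out).toList ++ scanC cs n := by
  induction cs generalizing n out with
  | nil => simp [scanC]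
  | cons c rest ih =>
    by_cases hc : c = '?'
    · rw [List.foldl_cons]; simp only [hc, if_true]
      rw [ih]
      simp [scanC, PySem.Str.toList_join, join_empty_flatten, dollar]
    · rw [List.foldl_cons]; simp only [hc, if_false]
      rw [ih]
      simp [scanC, hc, PySem.Str.toList_join, join_empty_flatten]

theorem altB (query : String) :
    (convert_placeholders_py_alt query).toList = scanC query.toList 0 := by
  unfold convert_placeholders_py_alt
  rw [foldB]
  simp [PySem.Str.toList_join, PySem.Chars.join_nil]

-- ===== VERDICT (by name: the statement is the Claim_ definition above) =====
theorem convert_placeholders_py_spec : Claim_equal_convert_placeholders_py := by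
  intro query _
  unfold Spec_convert_placeholders_py
  apply String.toList_inj.mp
  rw [altB, scanC_eq]
  unfold convert_placeholders_py
  rw [splitOn_eq_mySplit]
  rcases hm : mySplit query.toList with _ | ⟨p, ps⟩
  · exact absurd hm (mySplit_ne_nil query.toList)
  · by_cases hlen : ((p :: ps).map String.ofList).length = 1
    · rw [if_pos hlen]
      have hps : ps = [] := by simpa using hlen
      subst hps
      have := mySplit_singleton query.toList p hm
      simp [← this, rebuildTail]
    · rw [if_neg hlen]
      rw [foldA]
      simp [Function.comp_def]
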